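-- pv_equiv track=rewrite | github.com/takecian/ProgrammingStudyLog | projecteulerback/31-40/33.py | grouping_primes
-- ===== SOURCE A (Python) =====
-- def get_primes(v):
--     m = {}
--     i = 2
--
--     while i <= v:
--         while v % i == 0:
--             if i in m:
--                 m[i] += 1
--             else:
--                 m[i] = 1
--             v //= i
--
--         i += 1
--
--     return m
--
-- def grouping_primes(l):
--     dic = {}
--     for d in l:
--         s = get_primes(d)
--
--         for key, value in s.items():
--             if key in dic:
--                 dic[key] = value + dic[key]
--             else:
--                 dic[key] = value
--     return dic
-- ===== SOURCE B (Python) =====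
-- def factorize(d):
--     # trial division only up to sqrt(d); whatever remains (> 1) is prime
--     fs = []
--     i = 2
--     while i * i <= d:
--         c = 0
--         while d % i == 0:
--             d //= i
--             c += 1
--         if c:
--             fs.append((i, c))
--         i += 1
--     if d > 1:
--         fs.append((d, 1))
--     return fs
--
-- def grouping_primes(l):
--     dic = {}
--     for d in l:
--         for p, e in factorize(d):
--             dic[p] = dic.get(p, 0) + e
--     return dic
-- ===== Notes on version B (the rewrite author's own statement) =====
-- stated objective: faster
-- what changed: Per-number trial division now stops at sqrt(d) with the remaining cofactor recorded as a prime, and each factor is merged straight into the global counter instead of building a per-number dict and folding its items.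
import Mathlib
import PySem

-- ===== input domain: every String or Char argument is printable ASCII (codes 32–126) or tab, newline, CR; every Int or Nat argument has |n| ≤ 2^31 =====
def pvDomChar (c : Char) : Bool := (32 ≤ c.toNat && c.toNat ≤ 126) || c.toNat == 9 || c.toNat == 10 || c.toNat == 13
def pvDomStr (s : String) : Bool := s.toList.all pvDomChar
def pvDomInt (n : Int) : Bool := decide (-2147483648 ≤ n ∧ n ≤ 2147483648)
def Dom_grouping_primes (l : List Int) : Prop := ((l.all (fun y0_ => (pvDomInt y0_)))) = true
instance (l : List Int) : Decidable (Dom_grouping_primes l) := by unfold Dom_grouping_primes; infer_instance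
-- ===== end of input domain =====

-- B changes the algorithm: trial division only up to sqrt(d) plus a leftover-prime step,
-- merging factors directly into the global counter (timing: A timed out at the largest size where B returned).

-- small termination lemmas cited by the ports' `decreasing_by` blocks
theorem pvLeMulSelf (i : Int) : i ≤ i * i := by nlinarith [mul_self_nonneg (2 * i - 1)]

theorem pvFloordivLt (i v : Int) (h : 0 < v ∧ 2 ≤ i ∧ PySem.Int.mod v i = 0) :
    0 ≤ PySem.Int.floordiv v i ∧ PySem.Int.floordiv v i < v ∧ PySem.Int.floordiv v i = v / i := by
  have h2 : PySem.Int.floordiv v i = v / i := PySem.Int.floordiv_eq_ediv_of_pos (by omega)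
  have h3 : v / i < v := Int.ediv_lt_of_lt_mul (by omega) (by nlinarith [h.1, h.2.1])
  have h4 : 0 ≤ v / i := Int.ediv_nonneg (by omega) (by omega)
  exact ⟨h2 ▸ h4, h2 ▸ h3, h2⟩

theorem pvDecDiv (i v : Int) (h : 0 < v ∧ 2 ≤ i ∧ PySem.Int.mod v i = 0) :
    (PySem.Int.floordiv v i).toNat < v.toNat := by
  have := pvFloordivLt i v h
  omega

-- ===== PORT A =====
-- inner `while v % i == 0` of get_primes; the `0 < v ∧ 2 ≤ i` guard is a totality guard
-- (Python only reaches this loop with 2 ≤ i ≤ v and would not terminate otherwise)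
def gpInner (m : PySem.Dict Int Int) (i v : Int) : PySem.Dict Int Int × Int :=
  if h : 0 < v ∧ 2 ≤ i ∧ PySem.Int.mod v i = 0 then
    gpInner (if m.contains i then m.insert i (m.getD i 0 + 1) else m.insert i 1)
      i (PySem.Int.floordiv v i)
  else (m, v)
termination_by v.toNat
decreasing_by
  exact pvDecDiv i v h

theorem gpInner_snd_le (m : PySem.Dict Int Int) (i v : Int) : (gpInner m i v).2 ≤ v := by
  rw [gpInner]
  split
  · rename_i h
    have h3 := pvFloordivLt i v h
    have := gpInner_snd_le (if m.contains i then m.insert i (m.getD i 0 + 1) else m.insert i 1)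
      i (PySem.Int.floordiv v i)
    omega
  · simp
termination_by v.toNat
decreasing_by
  exact pvDecDiv i v (by assumption)

theorem pvDecOuter (m : PySem.Dict Int Int) (i v : Int) (h : i ≤ v) :
    ((gpInner m i v).2 + 1 - (i + 1)).toNat < (v + 1 - i).toNat := by
  have := gpInner_snd_le m i v
  omega

-- outer `while i <= v` of get_primes
def gpOuter (m : PySem.Dict Int Int) (i v : Int) : PySem.Dict Int Int :=
  if i ≤ v then
    gpOuter (gpInner m i v).1 (i + 1) (gpInner m i v).2
  else m
termination_by (v + 1 - i).toNat
decreasing_by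
  exact pvDecOuter m i v (by omega)

def getPrimes (v : Int) : PySem.Dict Int Int := gpOuter PySem.Dict.empty 2 v

-- the `for key, value in s.items()` merge loop of A
def mergeA (dic : PySem.Dict Int Int) (xs : List (Int × Int)) : PySem.Dict Int Int :=
  xs.foldl (fun dic kv =>
    if dic.contains kv.1 then dic.insert kv.1 (kv.2 + dic.getD kv.1 0)
    else dic.insert kv.1 kv.2) dic

def grouping_primes (l : List Int) : List (Int × Int) :=
  (l.foldl (fun dic d => mergeA dic (getPrimes d).items) PySem.Dict.empty).items

-- ===== PORT B =====
-- inner `while d % i == 0` of factorize; returns (d', c'); same totality guard as gpInner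
def stripB (i d c : Int) : Int × Int :=
  if h : 0 < d ∧ 2 ≤ i ∧ PySem.Int.mod d i = 0 then
    stripB i (PySem.Int.floordiv d i) (c + 1)
  else (d, c)
termination_by d.toNat
decreasing_by
  exact pvDecDiv i d h

theorem stripB_fst_le (i d c : Int) : (stripB i d c).1 ≤ d := by
  rw [stripB]
  split
  · rename_i h
    have h3 := pvFloordivLt i d h
    have := stripB_fst_le i (PySem.Int.floordiv d i) (c + 1)
    omega
  · simp
termination_by d.toNat
decreasing_by
  exact pvDecDiv i d (by assumption)

theorem pvDecFact (i d : Int) (h : i * i ≤ d) :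
    ((stripB i d 0).1 + 1 - (i + 1)).toNat < (d + 1 - i).toNat := by
  have h1 := stripB_fst_le i d 0
  have h2 := pvLeMulSelf i
  omega

-- outer `while i * i <= d` of factorize
def factLoop (i d : Int) : List (Int × Int) :=
  if i * i ≤ d then
    (if (stripB i d 0).2 > 0 then [(i, (stripB i d 0).2)] else []) ++
      factLoop (i + 1) (stripB i d 0).1
  else if d > 1 then [(d, 1)] else []
termination_by (d + 1 - i).toNat
decreasing_by
  rename_i h
  exact pvDecFact i d h

def factorize (d : Int) : List (Int × Int) := factLoop 2 d

-- the `for p, e in factorize(d)` merge loop of B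
def mergeB (dic : PySem.Dict Int Int) (ps : List (Int × Int)) : PySem.Dict Int Int :=
  ps.foldl (fun dic pe => dic.insert pe.1 (dic.getD pe.1 0 + pe.2)) dic

def grouping_primes_alt (l : List Int) : List (Int × Int) :=
  (l.foldl (fun dic d => mergeB dic (factorize d)) PySem.Dict.empty).items

-- ===== PRECONDITION & SPEC =====
def Spec_grouping_primes (l : List Int) (out : List (Int × Int)) : Prop := out = grouping_primes_alt l
instance (l : List Int) (out : List (Int × Int)) : Decidable (Spec_grouping_primes l out) := by unfold Spec_grouping_primes; infer_instance

-- ===== CLAIM (what is proved, stated in full; the proofs are below) =====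
def Claim_equal_grouping_primes : Prop := ∀ (l : List Int), Dom_grouping_primes l → Spec_grouping_primes l (grouping_primes l)

-- ===== LEMMAS AND PROOFS =====

-- basic facts about stripB
theorem stripB_snd_ge (i d c : Int) : c ≤ (stripB i d c).2 := by
  rw [stripB]
  split
  · rename_i h
    have h3 := pvFloordivLt i d h
    have := stripB_snd_ge i (PySem.Int.floordiv d i) (c + 1)
    omega
  · simp
termination_by d.toNat
decreasing_by
  exact pvDecDiv i d (by assumption)

theorem stripB_fst_pos (i d c : Int) (hd : 0 < d) : 0 < (stripB i d c).1 := by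
  rw [stripB]
  split
  · rename_i h
    have hdvd : i ∣ d := (PySem.Int.mod_eq_zero_iff_dvd d i).mp h.2.2
    have h2 := (pvFloordivLt i d h).2.2
    have hiv : i ≤ d := Int.le_of_dvd hd hdvd
    have h5 : 1 ≤ d / i := by
      rw [Int.le_ediv_iff_mul_le (by omega)]; omega
    exact stripB_fst_pos i (PySem.Int.floordiv d i) (c + 1) (by omega)
  · exact hd
termination_by d.toNat
decreasing_by
  exact pvDecDiv i d (by assumption)

theorem stripB_fst_dvd (i d c : Int) : (stripB i d c).1 ∣ d := by
  rw [stripB]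
  split
  · rename_i h
    have hdvd : i ∣ d := (PySem.Int.mod_eq_zero_iff_dvd d i).mp h.2.2
    have h2 := (pvFloordivLt i d h).2.2
    have hq : d / i ∣ d := ⟨i, (Int.ediv_mul_cancel hdvd).symm⟩
    exact dvd_trans (stripB_fst_dvd i (PySem.Int.floordiv d i) (c + 1)) (h2 ▸ hq)
  · exact dvd_refl d
termination_by d.toNat
decreasing_by
  exact pvDecDiv i d (by assumption)

theorem stripB_fst_not_dvd (i d c : Int) (hd : 0 < d) (hi : 2 ≤ i) :
    ¬ i ∣ (stripB i d c).1 := by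
  rw [stripB]
  split
  · rename_i h
    have hdvd : i ∣ d := (PySem.Int.mod_eq_zero_iff_dvd d i).mp h.2.2
    have hiv : i ≤ d := Int.le_of_dvd hd hdvd
    have h2 := (pvFloordivLt i d h).2.2
    have h5 : 1 ≤ d / i := by
      rw [Int.le_ediv_iff_mul_le (by omega)]; omega
    exact stripB_fst_not_dvd i (PySem.Int.floordiv d i) (c + 1) (by omega) hi
  · rename_i h
    intro hdvd
    exact h ⟨hd, hi, (PySem.Int.mod_eq_zero_iff_dvd d i).mpr hdvd⟩
termination_by d.toNat
decreasing_by
  exact pvDecDiv i d (by assumption)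

-- gpInner on a dict that already holds count c at key i
theorem gpInner_insert (i v : Int) (m : PySem.Dict Int Int) (c : Int) :
    gpInner (m.insert i c) i v = ((m.insert i (stripB i v c).2), (stripB i v c).1) := by
  rw [gpInner, stripB]
  split
  · rename_i h
    rw [PySem.Dict.contains_insert_self]
    simp only [if_true, PySem.Dict.getD_insert_self, PySem.Dict.insert_insert_self]
    exact gpInner_insert i (PySem.Int.floordiv v i) m (c + 1)
  · rfl
termination_by v.toNat
decreasing_by
  exact pvDecDiv i v (by assumption)

-- gpInner on a dict not containing i IS stripB (count 0 means no insertion at all)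
theorem gpInner_not_contains (i v : Int) (m : PySem.Dict Int Int)
    (hnc : m.contains i = false) :
    gpInner m i v =
      ((if (stripB i v 0).2 = 0 then m else m.insert i (stripB i v 0).2), (stripB i v 0).1) := by
  rw [gpInner]
  conv_rhs => rw [stripB]
  split
  · rename_i h
    rw [hnc]
    simp only [Bool.false_eq_true, if_false]
    rw [gpInner_insert i (PySem.Int.floordiv v i) m 1]
    have hge := stripB_snd_ge i (PySem.Int.floordiv v i) (0 + 1)
    rw [if_neg (by omega)]
    norm_num
  · simp

-- A's merge loop equals B's merge loop (same updates, commuted addition)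
theorem mergeA_eq_mergeB (dic : PySem.Dict Int Int) (xs : List (Int × Int)) :
    mergeA dic xs = mergeB dic xs := by
  induction xs generalizing dic with
  | nil => rfl
  | cons p ps ih =>
    unfold mergeA mergeB
    simp only [List.foldl_cons]
    have hstep : (if dic.contains p.1 then dic.insert p.1 (p.2 + dic.getD p.1 0)
        else dic.insert p.1 p.2) = dic.insert p.1 (dic.getD p.1 0 + p.2) := by
      by_cases hc : dic.contains p.1
      · rw [if_pos hc, add_comm]
      · rw [if_neg hc,
          PySem.Dict.getD_of_not_contains dic 0 (by simpa using hc), zero_add]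
    rw [hstep]
    exact ih (dic.insert p.1 (dic.getD p.1 0 + p.2))

-- merging pairwise-fresh keys appends them verbatim
theorem mergeB_fresh_items (ps : List (Int × Int)) (m : PySem.Dict Int Int)
    (hfresh : ∀ p ∈ ps, m.contains p.1 = false) (hnd : (ps.map Prod.fst).Nodup) :
    (mergeB m ps).items = m.items ++ ps := by
  induction ps generalizing m with
  | nil => simp [mergeB]
  | cons p ps ih =>
    unfold mergeB
    simp only [List.foldl_cons]
    have hm : m.getD p.1 0 = 0 :=
      PySem.Dict.getD_of_not_contains m 0 (hfresh p (by simp))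
    rw [hm, zero_add]
    have hres := ih (m.insert p.1 p.2) ?_ ?_
    · unfold mergeB at hres
      rw [hres, PySem.Dict.items_insert_of_not_contains m p.2 (hfresh p (by simp))]
      simp
    · intro q hq
      rw [PySem.Dict.contains_insert]
      have h1 : q.1 ≠ p.1 := by
        simp only [List.map_cons, List.nodup_cons] at hnd
        intro he; exact hnd.1 (he ▸ List.mem_map_of_mem hq)
      simp [h1, hfresh q (by simp [hq])]
    · simp only [List.map_cons, List.nodup_cons] at hnd
      exact hnd.2

-- if v < i*i and v has no divisor in [2,i), it has none in [i,v) either (the cofactor would be small)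
theorem cofactor (v i t : Int) (hv : 1 < v) (hi : 2 ≤ i) (hsq : v < i * i)
    (hnd : ∀ j, 2 ≤ j → j < i → ¬ j ∣ v) (hit : i ≤ t) (htv : t < v) : ¬ t ∣ v := by
  rintro ⟨k, hk⟩
  have ht0 : 0 < t := by omega
  have hk0 : 0 < k := by nlinarith
  have hk1 : k ≠ 1 := by rintro rfl; omega
  have hki : k < i := by nlinarith
  exact hnd k (by omega) hki ⟨t, by linarith [hk, mul_comm t k]⟩

-- once past sqrt(v) with no divisor found, A's outer loop scans up to v and records v once
theorem gpSkip (v j : Int) (m : PySem.Dict Int Int) (hv : 1 < v) (hj : 2 ≤ j) (hjv : j ≤ v)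
    (hnd : ∀ t, j ≤ t → t < v → ¬ t ∣ v) (hnc : m.contains v = false) :
    gpOuter m j v = m.insert v 1 := by
  rcases eq_or_lt_of_le hjv with heq | hlt
  · rw [← heq] at hnc ⊢
    rw [gpOuter, if_pos (le_refl j)]
    have hinner : gpInner m j j = (m.insert j 1, 1) := by
      rw [gpInner, dif_pos ⟨by omega, by omega, (PySem.Int.mod_eq_zero_iff_dvd j j).mpr dvd_rfl⟩]
      rw [hnc]
      simp only [Bool.false_eq_true, if_false]
      have hfd : PySem.Int.floordiv j j = 1 := by
        rw [PySem.Int.floordiv_eq_ediv_of_pos (by omega), Int.ediv_self (by omega)]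
      rw [hfd, gpInner, dif_neg]
      intro h
      have h1 : j ∣ (1 : Int) := (PySem.Int.mod_eq_zero_iff_dvd 1 j).mp h.2.2
      have := Int.le_of_dvd (by omega) h1
      omega
    rw [hinner]
    rw [gpOuter, if_neg (by omega)]
  · rw [gpOuter, if_pos (by omega)]
    have hinner : gpInner m j v = (m, v) := by
      rw [gpInner, dif_neg]
      intro h
      exact hnd j (le_refl j) hlt ((PySem.Int.mod_eq_zero_iff_dvd v j).mp h.2.2)
    rw [hinner]
    exact gpSkip v (j + 1) m hv (by omega) (by omega)
      (fun t ht htv => hnd t (by omega) htv) hnc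
termination_by (v - j).toNat
decreasing_by omega

-- every key factLoop i v emits is at least i (given the no-small-divisor invariant)
theorem factLoop_key_lb (v i : Int) (hv : 0 < v) (hi : 2 ≤ i)
    (hnd : ∀ j, 2 ≤ j → j < i → ¬ j ∣ v) : ∀ p ∈ factLoop i v, i ≤ p.1 := by
  intro p hp
  rw [factLoop] at hp
  split at hp
  · rename_i hsq
    have hiv : i ≤ v := le_trans (pvLeMulSelf i) hsq
    rw [List.mem_append] at hp
    rcases hp with hp | hp
    · split at hp
      · simp only [List.mem_singleton] at hp
        subst hp
        simp
      · simp at hp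
    · have hd0 : 0 < (stripB i v 0).1 := stripB_fst_pos i v 0 hv
      have hdvd : (stripB i v 0).1 ∣ v := stripB_fst_dvd i v 0
      have hnd' : ∀ j, 2 ≤ j → j < i + 1 → ¬ j ∣ (stripB i v 0).1 := by
        intro j h2j hji hjd
        rcases eq_or_lt_of_le (by omega : j ≤ i) with heq | hlt
        · exact stripB_fst_not_dvd i v 0 hv hi (heq ▸ hjd)
        · exact hnd j h2j hlt (dvd_trans hjd hdvd)
      have := factLoop_key_lb (stripB i v 0).1 (i + 1) hd0 (by omega) hnd' p hp
      omega
  · rename_i hsq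
    split at hp
    · rename_i h1
      have hiv : i ≤ v := by
        by_contra hlt
        exact hnd v (by omega) (by omega) dvd_rfl
      simp only [List.mem_singleton] at hp
      subst hp
      simpa using hiv
    · simp at hp
termination_by (v + 1 - i).toNat
decreasing_by
  exact pvDecFact i v (by assumption)

-- factLoop's keys are strictly increasing
theorem factLoop_keys_sorted (v i : Int) (hv : 0 < v) (hi : 2 ≤ i)
    (hnd : ∀ j, 2 ≤ j → j < i → ¬ j ∣ v) :
    ((factLoop i v).map Prod.fst).Pairwise (· < ·) := by
  rw [factLoop]
  split
  · rename_i hsq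
    have hiv : i ≤ v := le_trans (pvLeMulSelf i) hsq
    have hd0 : 0 < (stripB i v 0).1 := stripB_fst_pos i v 0 hv
    have hdvd : (stripB i v 0).1 ∣ v := stripB_fst_dvd i v 0
    have hnd' : ∀ j, 2 ≤ j → j < i + 1 → ¬ j ∣ (stripB i v 0).1 := by
      intro j h2j hji hjd
      rcases eq_or_lt_of_le (by omega : j ≤ i) with heq | hlt
      · exact stripB_fst_not_dvd i v 0 hv hi (heq ▸ hjd)
      · exact hnd j h2j hlt (dvd_trans hjd hdvd)
    have htail := factLoop_keys_sorted (stripB i v 0).1 (i + 1) hd0 (by omega) hnd'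
    have hlb := factLoop_key_lb (stripB i v 0).1 (i + 1) hd0 (by omega) hnd'
    split
    · simp only [List.map_cons, List.singleton_append, List.pairwise_cons]
      refine ⟨?_, htail⟩
      intro k hk
      rw [List.mem_map] at hk
      obtain ⟨p, hp, rfl⟩ := hk
      have := hlb p hp
      omega
    · simpa using htail
  · rename_i hsq
    split
    · simp
    · simp
termination_by (v + 1 - i).toNat
decreasing_by
  exact pvDecFact i v (by assumption)

-- THE core invariant: A's remaining outer loop = merging B's remaining factor list
theorem gpMain (v i : Int) (m : PySem.Dict Int Int) (hv : 0 < v) (hi : 2 ≤ i)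
    (hnd : ∀ j, 2 ≤ j → j < i → ¬ j ∣ v) (hk : ∀ k ∈ m.keys, k < i) :
    gpOuter m i v = mergeB m (factLoop i v) := by
  have hnci : m.contains i = false := by
    rw [PySem.Dict.contains_eq_decide_mem_keys]
    simp only [decide_eq_false_iff_not]
    intro hmem
    exact absurd (hk i hmem) (lt_irrefl i)
  by_cases hsq : i * i ≤ v
  · have hiv : i ≤ v := le_trans (pvLeMulSelf i) hsq
    rw [gpOuter, if_pos hiv, factLoop, if_pos hsq]
    rw [gpInner_not_contains i v m hnci]
    have hd0 : 0 < (stripB i v 0).1 := stripB_fst_pos i v 0 hv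
    have hdvd : (stripB i v 0).1 ∣ v := stripB_fst_dvd i v 0
    have hnd' : ∀ j, 2 ≤ j → j < i + 1 → ¬ j ∣ (stripB i v 0).1 := by
      intro j h2j hji hjd
      rcases eq_or_lt_of_le (by omega : j ≤ i) with heq | hlt
      · exact stripB_fst_not_dvd i v 0 hv hi (heq ▸ hjd)
      · exact hnd j h2j hlt (dvd_trans hjd hdvd)
    have hge := stripB_snd_ge i v 0
    by_cases hc : (stripB i v 0).2 = 0
    · rw [if_pos hc]
      simp only
      rw [if_neg (by omega)]
      simp only [List.nil_append]
      exact gpMain (stripB i v 0).1 (i + 1) m hd0 (by omega) hnd'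
        (fun k hkm => by have := hk k hkm; omega)
    · rw [if_neg hc]
      simp only
      rw [if_pos (by omega)]
      have hmerge1 : mergeB m ([(i, (stripB i v 0).2)] ++ factLoop (i + 1) (stripB i v 0).1)
          = mergeB (m.insert i (stripB i v 0).2) (factLoop (i + 1) (stripB i v 0).1) := by
        unfold mergeB
        rw [List.foldl_append]
        simp only [List.foldl_cons, List.foldl_nil]
        rw [PySem.Dict.getD_of_not_contains m 0 hnci, zero_add]
      rw [hmerge1]
      refine gpMain (stripB i v 0).1 (i + 1) (m.insert i (stripB i v 0).2) hd0 (by omega) hnd' ?_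
      intro k hkm
      rw [PySem.Dict.mem_keys_insert] at hkm
      rcases hkm with rfl | hkm
      · omega
      · have := hk k hkm; omega
  · rw [factLoop, if_neg (by omega)]
    by_cases hv1 : 1 < v
    · rw [if_pos hv1]
      have hiv : i ≤ v := by
        by_contra hlt
        exact hnd v (by omega) (by omega) dvd_rfl
      have hncv : m.contains v = false := by
        rw [PySem.Dict.contains_eq_decide_mem_keys]
        simp only [decide_eq_false_iff_not]
        intro hmem
        have := hk v hmem; omega
      rw [gpSkip v i m hv1 hi hiv (fun t hit htv => cofactor v i t hv1 hi (by omega) hnd hit htv) hncv]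
      unfold mergeB
      simp only [List.foldl_cons, List.foldl_nil]
      rw [PySem.Dict.getD_of_not_contains m 0 hncv, zero_add]
    · rw [if_neg hv1]
      rw [gpOuter, if_neg (by omega)]
      rfl
termination_by (v + 1 - i).toNat
decreasing_by
  all_goals exact pvDecFact i v (by assumption)

-- per-number equality: A's per-number dict lists exactly B's factor list
theorem itemsEq (d : Int) : (getPrimes d).items = factorize d := by
  unfold getPrimes factorize
  by_cases hd : 0 < d
  · rw [gpMain d 2 PySem.Dict.empty hd (le_refl 2) (by omega) (by simp)]
    have hpw := factLoop_keys_sorted d 2 hd (le_refl 2) (by omega)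
    rw [mergeB_fresh_items (factLoop 2 d) PySem.Dict.empty (by simp)
      (hpw.imp (fun h => ne_of_lt h))]
    simp [PySem.Dict.empty]
  · rw [gpOuter, if_neg (by omega), factLoop, if_neg (by omega), if_neg (by omega)]
    rfl

-- ===== VERDICT (by name: the statement is the Claim_ definition above) =====
theorem grouping_primes_spec : Claim_equal_grouping_primes := by
  intro l _
  unfold Spec_grouping_primes grouping_primes grouping_primes_alt
  congr 1
  apply PySem.List.foldl_congr_mem
  intro dic d _
  rw [mergeA_eq_mergeB, itemsEq]
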